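-- pv_equiv track=rewrite | github.com/sequencer/zaozi | rvprobe/scripts/asm2dsl.py | gas_mnemonic_to_dsl_name
-- ===== SOURCE A (Python) =====
-- def gas_mnemonic_to_dsl_name(mnemonic: str) -> str:
--     """
--     Convert GAS-style mnemonic to DSL function name.
--
--     GAS uses dots and lowercase: add.uw, amoswap.w, c.addi, lr.w
--     DSL uses camelCase:          addUw,  amoswapW,  cAddi,  lrW
--
--     Also handles special suffixes like .aq, .rl, .aqrl
--     """
--     # Handle dot-separated parts
--     if "." not in mnemonic:
--         return mnemonic
--
--     parts = mnemonic.split(".")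
--     result = parts[0]
--     for part in parts[1:]:
--         if part:
--             result += part[0].upper() + part[1:]
--     return result
-- ===== SOURCE B (Python) =====
-- def gas_mnemonic_to_dsl_name(mnemonic: str) -> str:
--     out = []
--     cap = False
--     for ch in mnemonic:
--         if ch == '.':
--             cap = True
--         else:
--             out.append(ch.upper() if cap else ch)
--             cap = False
--     return ''.join(out)
-- ===== Notes on version B (the rewrite author's own statement) =====
-- stated objective: alternative
-- what changed: Replaces the split-on-dot-then-concatenate-segments decomposition with a single stateful character scan that drops dots and uppercases the character following a dot.
import Mathlib
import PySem

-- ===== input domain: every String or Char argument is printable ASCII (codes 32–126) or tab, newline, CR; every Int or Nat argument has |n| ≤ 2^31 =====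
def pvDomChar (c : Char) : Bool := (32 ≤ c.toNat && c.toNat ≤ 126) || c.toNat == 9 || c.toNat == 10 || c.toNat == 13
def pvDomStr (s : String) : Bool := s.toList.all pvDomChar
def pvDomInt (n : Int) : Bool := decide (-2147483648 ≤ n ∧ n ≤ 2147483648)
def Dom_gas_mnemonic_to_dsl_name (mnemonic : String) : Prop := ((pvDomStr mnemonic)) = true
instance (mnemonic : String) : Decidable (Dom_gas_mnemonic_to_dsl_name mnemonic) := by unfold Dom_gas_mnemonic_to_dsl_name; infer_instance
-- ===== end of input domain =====

-- B replaces A's split-on-"." / per-segment loop with a single character scan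
-- carrying a capitalize-next flag (objective: alternative decomposition, same cost).

-- ===== PORT A =====
def gas_mnemonic_to_dsl_name (mnemonic : String) : String :=
  if PySem.Str.isIn "." mnemonic = false then mnemonic
  else
    let parts := PySem.Chars.splitOn mnemonic.toList ".".toList
    let result := PySem.List.pyGetD parts 0 []
    String.ofList ((PySem.List.slice parts (some 1) none).foldl
      (fun r part => match part with
        | [] => r
        | h :: t => r ++ PySem.Chars.upperChar h :: t) result)

-- ===== PORT B =====
def gas_mnemonic_to_dsl_name_alt (mnemonic : String) : String :=
  String.ofList ((mnemonic.toList.foldl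
    (fun st ch =>
      if ch = '.' then (st.1, true)
      else (st.1 ++ [if st.2 then PySem.Chars.upperChar ch else ch], false))
    (([] : List Char), false)).1)

-- ===== PRECONDITION & SPEC =====
def Spec_gas_mnemonic_to_dsl_name (mnemonic : String) (out : String) : Prop := out = gas_mnemonic_to_dsl_name_alt mnemonic
instance (mnemonic : String) (out : String) : Decidable (Spec_gas_mnemonic_to_dsl_name mnemonic out) := by unfold Spec_gas_mnemonic_to_dsl_name; infer_instance

-- ===== CLAIM (what is proved, stated in full; the proofs are below) =====
def Claim_equal_gas_mnemonic_to_dsl_name : Prop := ∀ (mnemonic : String), Dom_gas_mnemonic_to_dsl_name mnemonic → Spec_gas_mnemonic_to_dsl_name mnemonic (gas_mnemonic_to_dsl_name mnemonic)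

-- ===== LEMMAS AND PROOFS =====

/-- Functional single-pass split of a char list at '.' (always nonempty). -/
def pvSplit1 : List Char → List (List Char)
  | [] => [[]]
  | c :: cs =>
    if c = '.' then [] :: pvSplit1 cs
    else match pvSplit1 cs with
      | [] => [[c]]
      | p :: ps => (c :: p) :: ps

/-- Capitalize the first character of a segment. -/
def pvCapF : List Char → List Char
  | [] => []
  | h :: t => PySem.Chars.upperChar h :: t

/-- Functional form of B's scan. -/
def pvScan : Bool → List Char → List Char
  | _, [] => []
  | cap, c :: cs =>
    if c = '.' then pvScan true cs
    else (if cap then PySem.Chars.upperChar c else c) :: pvScan false cs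

theorem pvSplit1_ne_nil (cs : List Char) : pvSplit1 cs ≠ [] := by
  cases cs with
  | nil => simp [pvSplit1]
  | cons c cs =>
    simp only [pvSplit1]
    split
    · simp
    · split <;> simp

theorem pvSplitOn_go_eq (fuel : Nat) :
    ∀ (l cur : List Char) (accs : List (List Char)), l.length ≤ fuel →
    PySem.Chars.splitOn.go ['.'] fuel l cur accs = accs.reverse ++
      (match pvSplit1 l with
        | [] => [cur.reverse]
        | p :: ps => (cur.reverse ++ p) :: ps) := by
  induction fuel with
  | zero =>
    intro l cur accs h
    have hl : l = [] := by cases l <;> simp_all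
    subst hl
    simp [PySem.Chars.splitOn.go, pvSplit1]
  | succ n ih =>
    intro l cur accs h
    cases l with
    | nil => simp [PySem.Chars.splitOn.go, pvSplit1]
    | cons c rest =>
      by_cases hc : c = '.'
      · subst hc
        rw [show PySem.Chars.splitOn.go ['.'] (n + 1) ('.' :: rest) cur accs =
              PySem.Chars.splitOn.go ['.'] n rest [] (cur.reverse :: accs) by
            simp [PySem.Chars.splitOn.go, List.isPrefixOf]]
        rw [ih rest [] (cur.reverse :: accs) (by simpa using Nat.le_of_succ_le_succ h)]
        cases hs : pvSplit1 rest with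
        | nil => exact absurd hs (pvSplit1_ne_nil rest)
        | cons p ps => simp [pvSplit1, hs]
      · rw [show PySem.Chars.splitOn.go ['.'] (n + 1) (c :: rest) cur accs =
              PySem.Chars.splitOn.go ['.'] n rest (c :: cur) accs by
            simp only [PySem.Chars.splitOn.go, List.isPrefixOf]
            rw [if_neg (by simpa using fun h' => hc h'.symm)]]
        rw [ih rest (c :: cur) accs (by simpa using Nat.le_of_succ_le_succ h)]
        cases hs : pvSplit1 rest with
        | nil => exact absurd hs (pvSplit1_ne_nil rest)
        | cons p ps => simp [pvSplit1, hs, hc]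

theorem pvSplitOn_dot (cs : List Char) :
    PySem.Chars.splitOn cs ['.'] = pvSplit1 cs := by
  rw [PySem.Chars.splitOn, pvSplitOn_go_eq (cs.length + 1) cs [] [] (by omega)]
  cases hs : pvSplit1 cs with
  | nil => exact absurd hs (pvSplit1_ne_nil cs)
  | cons p ps => simp

theorem pvScan_spec (cs : List Char) :
    pvScan false cs = (pvSplit1 cs).headD [] ++ (((pvSplit1 cs).tail).map pvCapF).flatten ∧
    pvScan true cs = ((pvSplit1 cs).map pvCapF).flatten := by
  induction cs with
  | nil => simp [pvScan, pvSplit1, pvCapF]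
  | cons c cs ih =>
    by_cases hc : c = '.'
    · simp [pvScan, pvSplit1, hc, ih.2, pvCapF]
    · cases hs : pvSplit1 cs with
      | nil => exact absurd hs (pvSplit1_ne_nil cs)
      | cons p ps =>
        rw [hs] at ih
        simp only [List.headD_cons, List.tail_cons] at ih
        constructor
        · simp [pvScan, pvSplit1, hc, hs, ih.1]
        · simp [pvScan, pvSplit1, hc, hs, pvCapF, ih.1]

theorem pvScan_no_dot (cs : List Char) (h : '.' ∉ cs) : pvScan false cs = cs := by
  induction cs with
  | nil => rfl
  | cons c cs ih =>
    simp only [List.mem_cons, not_or] at h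
    simp [pvScan, Ne.symm h.1, ih h.2]

theorem pvFoldlB (cs : List Char) :
    ∀ (acc : List Char) (cap : Bool),
    (cs.foldl (fun st ch =>
      if ch = '.' then (st.1, true)
      else (st.1 ++ [if st.2 then PySem.Chars.upperChar ch else ch], false))
      (acc, cap)).1 = acc ++ pvScan cap cs := by
  induction cs with
  | nil => intro acc cap; simp [pvScan]
  | cons c cs ih =>
    intro acc cap
    by_cases hc : c = '.'
    · simp [hc, List.foldl_cons, ih, pvScan]
    · simp [hc, List.foldl_cons, ih, pvScan]

theorem pvFoldlA (l : List (List Char)) :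
    ∀ (init : List Char),
    (l.foldl (fun r part => match part with
        | [] => r
        | h :: t => r ++ PySem.Chars.upperChar h :: t) init) = init ++ (l.map pvCapF).flatten := by
  induction l with
  | nil => intro init; simp
  | cons p ps ih =>
    intro init
    cases p with
    | nil => simp [List.foldl_cons, ih, pvCapF]
    | cons h t => simp [List.foldl_cons, ih, pvCapF]

-- ===== VERDICT (by name: the statement is the Claim_ definition above) =====
theorem gas_mnemonic_to_dsl_name_spec : Claim_equal_gas_mnemonic_to_dsl_name := by
  intro m _
  unfold Spec_gas_mnemonic_to_dsl_name gas_mnemonic_to_dsl_name gas_mnemonic_to_dsl_name_alt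
  rw [pvFoldlB, List.nil_append]
  by_cases hin : PySem.Str.isIn "." m = false
  · have hmem : '.' ∉ m.toList := by
      have := (PySem.Chars.isIn_eq_false_iff ".".toList m.toList).mp (by
        simpa [PySem.Str.isIn] using hin)
      simpa [List.singleton_infix_iff] using this
    rw [if_pos hin, pvScan_no_dot m.toList hmem, String.ofList_toList]
  · rw [if_neg hin]
    simp only [PySem.List.slice_from_one, pvFoldlA, PySem.List.pyGetD_zero]
    rw [show (".".toList : List Char) = ['.'] from rfl, pvSplitOn_dot,
        (pvScan_spec m.toList).1]
    cases hs : pvSplit1 m.toList with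
    | nil => exact absurd hs (pvSplit1_ne_nil m.toList)
    | cons p ps => simp
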